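-- pv_equiv track=rewrite | github.com/maxpblum/make-album | process_photo_data.py | build_min_dates
-- ===== SOURCE A (Python) =====
-- TIME_KEYS = ('FileAccessDate', 'FileModifyDate', 'CreateDate',
--              'DateTimeOriginal')
--
-- def get_key_from_name(name):
--     name = name.replace('.', '_')
--     if name.endswith('_mov'):
--         return name.replace('_mov', '_heic')
--     return name
--
-- def min_creation_date_from_exif(exif_obj):
--     return min(exif_obj[k] for k in TIME_KEYS if k in exif_obj)
--
-- def build_min_dates(exifs):
--     dates = {}
--     for exif in exifs:
--         exif_key = get_key_from_name(exif['SourceFile'])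
--         min_in_current_exif = min_creation_date_from_exif(exif)
--         min_from_existing_dates = dates.get(exif_key, min_in_current_exif)
--         dates[exif_key] = min(min_in_current_exif, min_from_existing_dates)
--     return dates
-- ===== SOURCE B (Python) =====
-- TIME_KEYS = ('FileAccessDate', 'FileModifyDate', 'CreateDate',
--              'DateTimeOriginal')
--
--
-- def _key_from_name(name):
--     name = name.replace('.', '_')
--     if name.endswith('_mov'):
--         return name.replace('_mov', '_heic')
--     return name
--
--
-- def build_min_dates(exifs):
--     # Group-then-reduce: collect every per-exif minimum per key, then take
--     # the minimum of each group in a second pass.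
--     groups = {}
--     for exif in exifs:
--         exif_key = _key_from_name(exif['SourceFile'])
--         m = min(exif[k] for k in TIME_KEYS if k in exif)
--         groups.setdefault(exif_key, []).append(m)
--     return {k: min(v) for k, v in groups.items()}
-- ===== Notes on version B (the rewrite author's own statement) =====
-- stated objective: alternative
-- what changed: B replaces A's online running-min fold over the dict with a group-then-reduce decomposition: one pass collects each per-exif minimum into per-key lists (setdefault/append), a second pass reduces each group with min.
import Mathlib
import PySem

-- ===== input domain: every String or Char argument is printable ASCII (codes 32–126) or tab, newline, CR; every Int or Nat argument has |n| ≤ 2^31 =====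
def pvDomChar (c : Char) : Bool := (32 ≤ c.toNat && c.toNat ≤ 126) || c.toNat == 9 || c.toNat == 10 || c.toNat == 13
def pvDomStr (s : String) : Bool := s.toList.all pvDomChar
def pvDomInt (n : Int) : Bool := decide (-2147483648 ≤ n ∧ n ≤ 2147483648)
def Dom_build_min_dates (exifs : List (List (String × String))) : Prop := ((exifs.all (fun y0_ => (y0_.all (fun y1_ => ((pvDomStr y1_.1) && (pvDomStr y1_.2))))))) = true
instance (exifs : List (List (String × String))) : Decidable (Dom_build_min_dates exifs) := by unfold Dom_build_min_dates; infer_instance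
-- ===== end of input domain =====

-- B replaces A's online running-min fold with a group-then-reduce decomposition
-- (collect all per-exif minima per key, then take each group's minimum);
-- same cost, equal return value on every input where A returns.

-- ===== PORT A =====
def pvTimeKeys : List String :=
  ["FileAccessDate", "FileModifyDate", "CreateDate", "DateTimeOriginal"]

def getKeyFromName (name : String) : String :=
  let name := PySem.Str.replace name "." "_"
  if PySem.Str.endswith name "_mov" then PySem.Str.replace name "_mov" "_heic"
  else name

-- min(exif_obj[k] for k in TIME_KEYS if k in exif_obj); none = ValueError (empty)
def minCreationDateFromExif (exif : List (String × String)) : Option String :=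
  PySem.List.min? (pvTimeKeys.filterMap (fun k => (PySem.Dict.mk exif).get? k)) (fun x => x)

-- Python min(a, b): first argument wins ties
def pyMin2 (a b : String) : String := if b < a then b else a

-- one iteration of A's loop body
def stepA (dates : PySem.Dict String String) (exif : List (String × String)) :
    PySem.Dict String String :=
  let exifKey := getKeyFromName (((PySem.Dict.mk exif).get? "SourceFile").getD "")
  let minInCurrent := (minCreationDateFromExif exif).getD ""
  let minFromExisting := dates.getD exifKey minInCurrent
  dates.insert exifKey (pyMin2 minInCurrent minFromExisting)

def build_min_dates (exifs : List (List (String × String))) : List (String × String) :=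
  (exifs.foldl stepA PySem.Dict.empty).items

-- ===== PORT B =====
-- min(v) for a nonempty list v (getD "" is only the totaliser; groups are never empty)
def minOfList (v : List String) : String :=
  (PySem.List.min? v (fun x => x)).getD ""

-- one iteration of B's grouping loop: groups.setdefault(key, []).append(m)
def stepB (groups : PySem.Dict String (List String)) (exif : List (String × String)) :
    PySem.Dict String (List String) :=
  let exifKey := getKeyFromName (((PySem.Dict.mk exif).get? "SourceFile").getD "")
  let m := (minCreationDateFromExif exif).getD ""
  groups.insert exifKey (groups.getD exifKey [] ++ [m])

def build_min_dates_alt (exifs : List (List (String × String))) : List (String × String) :=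
  let groups := exifs.foldl stepB PySem.Dict.empty
  groups.items.map (fun p => (p.1, minOfList p.2))

-- ===== PRECONDITION & SPEC =====
-- Pre_ excludes exactly the inputs where Python A raises: an exif without a
-- 'SourceFile' key (KeyError) or without any TIME_KEYS key (ValueError from min()).
def Pre_build_min_dates (exifs : List (List (String × String))) : Prop :=
  (exifs.all (fun exif =>
    exif.any (fun p => p.1 == "SourceFile") &&
    exif.any (fun p => pvTimeKeys.contains p.1))) = true

instance (exifs : List (List (String × String))) : Decidable (Pre_build_min_dates exifs) := by
  unfold Pre_build_min_dates; infer_instance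

def pvWitness_build_min_dates : (List (List (String × String))) :=
  [[("SourceFile", "a.mov"), ("CreateDate", "2020:01:01")],
   [("SourceFile", "a.heic"), ("FileModifyDate", "2019:05:05")]]

def Spec_build_min_dates (exifs : List (List (String × String))) (out : List (String × String)) : Prop := out = build_min_dates_alt exifs
instance (exifs : List (List (String × String))) (out : List (String × String)) : Decidable (Spec_build_min_dates exifs out) := by unfold Spec_build_min_dates; infer_instance

-- ===== CLAIM (what is proved, stated in full; the proofs are below) =====
def Claim_equal_build_min_dates : Prop := ∀ (exifs : List (List (String × String))), Dom_build_min_dates exifs → Pre_build_min_dates exifs → Spec_build_min_dates exifs (build_min_dates exifs)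

-- ===== LEMMAS AND PROOFS =====

-- f turns one of B's group entries into A's running-min entry
def pvF (p : String × List String) : String × String := (p.1, minOfList p.2)

theorem find?_map_pvF (L : List (String × List String)) (s : String) :
    List.find? (fun p => p.1 == s) (L.map pvF)
      = (List.find? (fun p => p.1 == s) L).map pvF := by
  induction L with
  | nil => rfl
  | cons h t ih =>
      simp only [List.map_cons, List.find?]
      by_cases hk : h.1 = s
      · simp [pvF, hk]
      · simp only [pvF]
        rw [show ((h.1 == s) = false) from beq_eq_false_iff_ne.2 hk]
        simpa [pvF] using ih

theorem min_eq_pyMin2 (a m : String) : min a m = pyMin2 m a := by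
  rw [min_def, pyMin2]
  split_ifs with h1 h2 h3
  · rfl
  · exact le_antisymm h1 (not_lt.mp h2)
  · exact absurd h3.le h1
  · rfl

theorem minOf_append (v : List String) (m : String) (hv : v ≠ []) :
    minOfList (v ++ [m]) = pyMin2 m (minOfList v) := by
  obtain ⟨x, t, rfl⟩ := List.exists_cons_of_ne_nil hv
  rw [minOfList, minOfList, List.cons_append,
    PySem.List.min?_id_cons, PySem.List.min?_id_cons,
    Option.getD_some, Option.getD_some, List.foldl_append]
  simp only [List.foldl]
  exact min_eq_pyMin2 _ m

theorem pyMin2_self (m : String) : pyMin2 m m = m := by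
  simp [pyMin2]

theorem insert_rel (L : List (String × List String)) (s m : String)
    (hne : ∀ p ∈ L, p.2 ≠ []) :
    (PySem.Dict.mk (L.map pvF)).insert s
        (pyMin2 m ((PySem.Dict.mk (L.map pvF)).getD s m))
      = PySem.Dict.mk
          ((((PySem.Dict.mk L).insert s ((PySem.Dict.mk L).getD s [] ++ [m])).items).map pvF) := by
  simp only [PySem.Dict.insert, PySem.Dict.getD, PySem.Dict.get?, PySem.Dict.contains]
  have hcont : ((L.map pvF).any fun p => p.1 == s) = (L.any fun p => p.1 == s) := by
    simp [List.any_map, Function.comp_def, pvF]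
  by_cases hc : (L.any fun p => p.1 == s) = true
  · -- key already present: both replace every matching entry
    rcases hq0 : List.find? (fun p => p.1 == s) L with _ | q
    · exfalso
      obtain ⟨p, hp, hps⟩ := List.any_eq_true.mp hc
      exact absurd hps (by simpa using List.find?_eq_none.mp hq0 p hp)
    have hq : List.find? (fun p => p.1 == s) L = some q := hq0
    have hqmem : q ∈ L := List.mem_of_find?_eq_some hq
    have hqne : q.2 ≠ [] := hne q hqmem
    rw [hcont, if_pos hc, if_pos hc, find?_map_pvF, hq]
    simp only [Option.map_some, Option.getD_some, pvF]
    have hval : pyMin2 m (minOfList q.2) = minOfList (q.2 ++ [m]) :=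
      (minOf_append q.2 m hqne).symm
    congr 1
    rw [List.map_map, List.map_map]
    apply List.map_congr_left
    intro p _
    by_cases hk : p.1 = s
    · simp [pvF, hk, hval]
    · simp [pvF, hk]
  · -- new key: both append; the fresh group is [m], whose min is m
    have hcf : ((L.map pvF).any fun p => p.1 == s) = false := by
      rw [hcont]; exact eq_false_of_ne_true hc
    have hfind : List.find? (fun p => p.1 == s) L = none := by
      rw [List.find?_eq_none]
      intro p hp
      by_contra hcontra
      exact hc (List.any_eq_true.2 ⟨p, hp, by simpa using hcontra⟩)
    rw [hcf, eq_false_of_ne_true hc, if_neg (by simp), if_neg (by simp),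
      find?_map_pvF, hfind]
    simp only [Option.map_none, Option.getD_none]
    rw [pyMin2_self]
    congr 1
    simp [pvF, minOfList, PySem.List.min?]

theorem step_rel (L : List (String × List String)) (exif : List (String × String))
    (hne : ∀ p ∈ L, p.2 ≠ []) :
    stepA (PySem.Dict.mk (L.map pvF)) exif
      = PySem.Dict.mk (((stepB (PySem.Dict.mk L) exif).items).map pvF) := by
  rw [stepA, stepB]
  exact insert_rel L _ _ hne

theorem step_ne (L : List (String × List String)) (exif : List (String × String))
    (hne : ∀ p ∈ L, p.2 ≠ []) :
    ∀ p ∈ (stepB (PySem.Dict.mk L) exif).items, p.2 ≠ [] := by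
  simp only [stepB, PySem.Dict.insert, PySem.Dict.contains]
  intro p hp
  split at hp
  · rcases List.mem_map.mp hp with ⟨q, hq, rfl⟩
    split
    · simp
    · exact hne q hq
  · rcases List.mem_append.mp hp with h | h
    · exact hne p h
    · simp only [List.mem_singleton] at h
      subst h; simp

theorem loop_rel (exifs : List (List (String × String))) :
    ∀ (L : List (String × List String)), (∀ p ∈ L, p.2 ≠ []) →
    (exifs.foldl stepA (PySem.Dict.mk (L.map pvF))).items
      = ((exifs.foldl stepB (PySem.Dict.mk L)).items).map pvF := by
  induction exifs with
  | nil => intro L _; rfl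
  | cons e t ih =>
      intro L hne
      simp only [List.foldl_cons]
      rw [step_rel L e hne]
      exact ih _ (step_ne L e hne)

-- ===== VERDICT (by name: the statement is the Claim_ definition above) =====
theorem build_min_dates_spec : Claim_equal_build_min_dates := by
  intro exifs _ _
  unfold Spec_build_min_dates build_min_dates build_min_dates_alt
  have h := loop_rel exifs [] (by simp)
  simpa [PySem.Dict.empty] using h
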